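-- pv_equiv track=rewrite | github.com/finlandcowboy/infobez | srp.py | generator_mod
-- ===== SOURCE A (Python) =====
-- import math
--
-- def generator_mod(N):
--     init_set, cur_set = set(), set()
--
--     for i in range(1,N):
--         if math.gcd(i, N):
--             init_set.add(i)
--
--     for i in range(1,N):
--         for j in range(1,N):
--             cur_set.add(pow(i,j) % N)
--
--         if init_set == cur_set:
--             return i
-- ===== SOURCE B (Python) =====
-- def generator_mod(N):
--     # Same cross-i accumulation as the original, but each power is obtained by one
--     # modular multiplication (running product) instead of pow(i, j) on full integers,
--     # and the expensive set-equality test is replaced by a zero-flag + size count.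
--     seen = set()
--     zero = False
--     for i in range(1, N):
--         p = i
--         for _ in range(1, N):
--             if p == 0:
--                 zero = True
--             else:
--                 seen.add(p)
--             p = p * i % N
--         if not zero and len(seen) == N - 1:
--             return i
--     return None
-- ===== Notes on version B (the rewrite author's own statement) =====
-- stated objective: faster
-- what changed: Replaces pow(i,j) (full-size integer exponentiation per pair) by an incremental running product mod N, drops the redundant gcd-built init_set, and replaces the per-i set-equality test by a zero-flag plus a size count.
import Mathlib
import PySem

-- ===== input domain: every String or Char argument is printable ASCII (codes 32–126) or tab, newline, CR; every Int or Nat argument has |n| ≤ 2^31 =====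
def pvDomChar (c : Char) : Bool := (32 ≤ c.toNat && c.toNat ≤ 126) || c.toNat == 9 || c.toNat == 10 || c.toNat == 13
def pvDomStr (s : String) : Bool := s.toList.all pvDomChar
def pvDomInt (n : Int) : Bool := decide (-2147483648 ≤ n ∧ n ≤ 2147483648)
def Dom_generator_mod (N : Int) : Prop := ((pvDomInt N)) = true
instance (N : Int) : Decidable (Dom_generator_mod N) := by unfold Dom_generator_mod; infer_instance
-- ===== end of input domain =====

-- B replaces pow(i,j) by an incremental running product mod N and the set-equality
-- test by a zero-flag plus a size count; measurably faster (constant/log-factor), same results.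

-- ===== PORT A =====
-- init_set: for i in range(1,N): if math.gcd(i,N): init_set.add(i)
def pvA_init (N : Int) : PySem.Set Int :=
  (PySem.List.pyRange 1 N 1).foldl
    (fun s i => if ((Int.gcd i N : Int) ≠ 0) then PySem.Set.add s i else s) PySem.Set.empty

-- outer loop with early return; cur_set accumulates across iterations of i
def pvA_loop (N : Int) (init : PySem.Set Int) : List Int → PySem.Set Int → Option Int
  | [], _ => none
  | i :: is, cur =>
      let cur' := (PySem.List.pyRange 1 N 1).foldl
        (fun c j => PySem.Set.add c (PySem.Int.mod (i ^ j.toNat) N)) cur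
      if PySem.Set.equal init cur' then some i else pvA_loop N init is cur'

def generator_mod (N : Int) : Option Int :=
  pvA_loop N (pvA_init N) (PySem.List.pyRange 1 N 1) PySem.Set.empty

-- ===== PORT B =====
-- inner loop of Source B: for _ in range(1,N): (test p, add) then p = p*i % N
def pvB_inner (N i : Int) : List Int → PySem.Set Int → Bool → Int → PySem.Set Int × Bool
  | [], seen, zero, _ => (seen, zero)
  | _ :: js, seen, zero, p =>
      if p = 0 then pvB_inner N i js seen true (PySem.Int.mod (p * i) N)
      else pvB_inner N i js (PySem.Set.add seen p) zero (PySem.Int.mod (p * i) N)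

def pvB_loop (N : Int) : List Int → PySem.Set Int → Bool → Option Int
  | [], _, _ => none
  | i :: is, seen, zero =>
      let r := pvB_inner N i (PySem.List.pyRange 1 N 1) seen zero i
      if !r.2 && (PySem.Set.len r.1 == N - 1) then some i
      else pvB_loop N is r.1 r.2

def generator_mod_alt (N : Int) : Option Int :=
  pvB_loop N (PySem.List.pyRange 1 N 1) PySem.Set.empty false

-- ===== PRECONDITION & SPEC =====
def Spec_generator_mod (N : Int) (out : Option Int) : Prop := out = generator_mod_alt N
instance (N : Int) (out : Option Int) : Decidable (Spec_generator_mod N out) := by unfold Spec_generator_mod; infer_instance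

-- ===== CLAIM (what is proved, stated in full; the proofs are below) =====
def Claim_equal_generator_mod : Prop := ∀ (N : Int), Dom_generator_mod N → Spec_generator_mod N (generator_mod N)

-- ===== LEMMAS AND PROOFS =====

-- init_set is exactly range(1,N): gcd(i,N) is never 0 for i >= 1
theorem pvA_init_eq (N : Int) : pvA_init N = PySem.List.pyRange 1 N 1 := by
  unfold pvA_init
  rw [PySem.List.foldl_congr_mem _ _ PySem.Set.add PySem.Set.empty]
  · show List.foldl PySem.Set.add [] _ = _
    rw [← PySem.Set.ofList_eq_foldl]
    exact PySem.Set.ofList_eq_self_of_nodup _ (PySem.List.nodup_pyRange_one 1 N)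
  · intro acc x hx
    have hx1 : 1 ≤ x := ((PySem.List.mem_pyRange_one).1 hx).1
    have : Int.gcd x N ≠ 0 := by
      intro h
      have := Int.gcd_eq_zero_iff.1 h
      omega
    simp [this]

-- nodup is preserved by the A-side inner fold
theorem nodup_foldl_add (l : List Int) (f : Int → Int) :
    ∀ (s : PySem.Set Int), s.Nodup →
      (l.foldl (fun c j => PySem.Set.add c (f j)) s).Nodup := by
  induction l with
  | nil => intro s hs; simpa using hs
  | cons x xs ih => intro s hs; exact ih _ (PySem.Set.nodup_add _ _ hs)

-- one accumulation step, seen-component: adding v to cur filters through unless v = 0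
theorem step_filter (cur : PySem.Set Int) (v : Int) :
    (PySem.Set.add cur v).filter (fun x => x != 0)
      = (if v = 0 then cur.filter (fun x => x != 0)
         else PySem.Set.add (cur.filter (fun x => x != 0)) v) := by
  rw [PySem.Set.add_eq_ite]
  by_cases hv : v = 0
  · subst hv
    by_cases h0 : (0 : Int) ∈ cur <;> simp [h0, List.filter_append]
  · have hmem : v ∈ cur.filter (fun x => x != 0) ↔ v ∈ cur := by
      simp [List.mem_filter, hv]
    by_cases hc : v ∈ cur
    · simp [hc, hv]
    · rw [PySem.Set.add_of_not_mem (fun h => hc (hmem.1 h))]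
      simp [hc, hv, List.filter_append]

-- one accumulation step, zero-flag component
theorem step_contains (cur : PySem.Set Int) (v : Int) :
    (PySem.Set.add cur v).contains 0 = (cur.contains 0 || (v == 0)) := by
  rw [PySem.Set.add_eq_ite]
  by_cases hv : v = 0
  · subst hv
    by_cases h0 : (0 : Int) ∈ cur <;> simp [h0]
  · by_cases hc : v ∈ cur <;> simp [hc, hv, Ne.symm hv]

-- the B-side inner loop tracks A's inner fold: seen = nonzero part of cur, zero = (0 ∈ cur)
theorem pvB_inner_spec (N i : Int) (hN : 0 < N) :
    ∀ (n : Nat) (e : Int), 0 ≤ e → ∀ (cur : PySem.Set Int) (p : Int),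
      p = PySem.Int.mod (i ^ (e + 1).toNat) N →
      pvB_inner N i ((List.range n).map (fun k : Nat => e + 1 + (k : Int)))
          (cur.filter (fun x => x != 0)) (cur.contains 0) p
        = ((((List.range n).map (fun k : Nat => e + 1 + (k : Int))).foldl
              (fun c j => PySem.Set.add c (PySem.Int.mod (i ^ j.toNat) N)) cur).filter
                (fun x => x != 0),
           (((List.range n).map (fun k : Nat => e + 1 + (k : Int))).foldl
              (fun c j => PySem.Set.add c (PySem.Int.mod (i ^ j.toNat) N)) cur).contains 0) := by
  intro n
  induction n with
  | zero => intro e he cur p hp; simp [pvB_inner]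
  | succ m ih =>
      intro e he cur p hp
      have hlist : (List.range (m + 1)).map (fun k : Nat => e + 1 + (k : Int))
          = (e + 1) :: (List.range m).map (fun k : Nat => (e + 1) + 1 + (k : Int)) := by
        rw [List.range_succ_eq_map, List.map_cons, List.map_map]
        congr 1
        · norm_num
        · apply List.map_congr_left
          intro k _
          simp only [Function.comp_apply]
          push_cast
          ring
      have hmul : ∀ a : Int, PySem.Int.mod (PySem.Int.mod a N * i) N = PySem.Int.mod (a * i) N := by
        intro a
        rw [PySem.Int.mod_eq_emod_of_pos hN, PySem.Int.mod_eq_emod_of_pos hN,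
          PySem.Int.mod_eq_emod_of_pos hN, Int.mul_emod, Int.emod_emod_of_dvd _ dvd_rfl,
          ← Int.mul_emod]
      have hp' : PySem.Int.mod (p * i) N = PySem.Int.mod (i ^ ((e + 1) + 1).toNat) N := by
        rw [hp, hmul]
        have h1 : ((e + 1) + 1).toNat = (e + 1).toNat + 1 := by omega
        rw [h1, pow_succ]
      rw [hlist]
      simp only [pvB_inner, List.foldl_cons]
      by_cases hzero : p = 0
      · subst hzero
        rw [if_pos rfl]
        have hv0 : PySem.Int.mod (i ^ (e + 1).toNat) N = 0 := hp.symm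
        rw [← ih (e + 1) (by omega)
          (PySem.Set.add cur (PySem.Int.mod (i ^ (e + 1).toNat) N)) _ hp']
        rw [hv0, step_filter, step_contains]
        simp
      · rw [if_neg hzero]
        rw [← ih (e + 1) (by omega)
          (PySem.Set.add cur (PySem.Int.mod (i ^ (e + 1).toNat) N)) _ hp']
        rw [← hp, step_filter, step_contains, if_neg hzero,
          beq_eq_false_iff_ne.2 hzero, Bool.or_false]

-- the equality test: init == cur  ⟺  0 ∉ cur and |cur| = N-1  (for cur ⊆ [0,N), nodup)
theorem equal_test (N : Int) (hN : 0 < N) (cur : PySem.Set Int)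
    (hnd : cur.Nodup) (hb : ∀ x ∈ cur, 0 ≤ x ∧ x < N) :
    PySem.Set.equal (PySem.List.pyRange 1 N 1) cur
      = (!cur.contains 0 && ((cur.length : Int) == N - 1)) := by
  rw [Bool.eq_iff_iff]
  constructor
  · intro h
    have h' := (PySem.Set.equal_iff _ _).1 h
    have h0 : (0:Int) ∉ cur := by
      intro h0
      have := (h' 0).2 h0
      rw [PySem.List.mem_pyRange_one] at this
      omega
    have hperm : (PySem.List.pyRange 1 N 1).Perm cur :=
      (List.perm_ext_iff_of_nodup (PySem.List.nodup_pyRange_one 1 N) hnd).2 h'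
    have hlen : cur.length = (N - 1).toNat := by
      rw [← hperm.length_eq, PySem.List.length_pyRange_one]
    simp only [Bool.and_eq_true, Bool.not_eq_true', beq_iff_eq]
    constructor
    · simpa [PySem.Set.contains_iff, ← Bool.not_eq_true] using h0
    · rw [hlen]; omega
  · intro h
    simp only [Bool.and_eq_true, Bool.not_eq_true', beq_iff_eq] at h
    obtain ⟨h0, hlen⟩ := h
    have h0' : (0:Int) ∉ cur := by
      intro hm
      rw [← PySem.Set.contains_iff] at hm
      rw [h0] at hm
      exact Bool.false_ne_true hm
    have hsub : cur.toFinset ⊆ (PySem.List.pyRange 1 N 1).toFinset := by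
      intro x hx
      rw [List.mem_toFinset] at hx
      rw [List.mem_toFinset, PySem.List.mem_pyRange_one]
      have h1 := hb x hx
      have h2 : x ≠ 0 := fun hh => h0' (hh ▸ hx)
      omega
    have hcard1 : cur.toFinset.card = cur.length := List.toFinset_card_of_nodup hnd
    have hcard2 : (PySem.List.pyRange 1 N 1).toFinset.card = (N - 1).toNat := by
      rw [List.toFinset_card_of_nodup (PySem.List.nodup_pyRange_one 1 N),
        PySem.List.length_pyRange_one]
    have hfeq : cur.toFinset = (PySem.List.pyRange 1 N 1).toFinset := by
      apply Finset.eq_of_subset_of_card_le hsub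
      rw [hcard1, hcard2]; omega
    apply (PySem.Set.equal_iff _ _).2
    intro x
    rw [← List.mem_toFinset, ← List.mem_toFinset (l := cur), hfeq]

-- main loop correspondence
theorem loop_spec (N : Int) (hN : 0 < N) :
    ∀ (is : List Int), (∀ i ∈ is, 1 ≤ i ∧ i < N) → ∀ (cur : PySem.Set Int),
      cur.Nodup → (∀ x ∈ cur, 0 ≤ x ∧ x < N) →
      pvB_loop N is (cur.filter (fun x => x != 0)) (cur.contains 0)
        = pvA_loop N (pvA_init N) is cur := by
  intro is
  induction is with
  | nil => intro _ cur _ _; simp [pvA_loop, pvB_loop]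
  | cons i is ih =>
      intro his cur hnd hb
      have hi : 1 ≤ i ∧ i < N := his i (List.mem_cons_self ..)
      simp only [pvA_loop, pvB_loop]
      set cur' := (PySem.List.pyRange 1 N 1).foldl
        (fun c j => PySem.Set.add c (PySem.Int.mod (i ^ j.toNat) N)) cur with hcur'
      have hrange : (List.range (N - 1).toNat).map (fun k : Nat => (0:Int) + 1 + (k : Int))
          = PySem.List.pyRange 1 N 1 := by
        rw [PySem.List.pyRange_one]
        apply List.map_congr_left
        intro k _
        push_cast
        ring
      have hinner := pvB_inner_spec N i hN (N - 1).toNat 0 (by omega) cur i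
        (by
          rw [PySem.Int.mod_eq_emod_of_pos hN]
          have h01 : ((0:Int) + 1).toNat = 1 := by omega
          rw [h01, pow_one, Int.emod_eq_of_lt (by omega) hi.2])
      rw [hrange, ← hcur'] at hinner
      have h1 : (pvB_inner N i (PySem.List.pyRange 1 N 1)
          (cur.filter (fun x => x != 0)) (cur.contains 0) i).1
          = cur'.filter (fun x => x != 0) := by rw [hinner]
      have h2 : (pvB_inner N i (PySem.List.pyRange 1 N 1)
          (cur.filter (fun x => x != 0)) (cur.contains 0) i).2
          = cur'.contains 0 := by rw [hinner]
      rw [h1, h2]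
      have hnd' : cur'.Nodup := nodup_foldl_add _ _ cur hnd
      have hb' : ∀ x ∈ cur', 0 ≤ x ∧ x < N := by
        intro x hx
        rw [hcur'] at hx
        rcases (PySem.Set.mem_foldl_add _ _ cur x).1 hx with h | ⟨j, _, rfl⟩
        · exact hb x h
        · exact ⟨PySem.Int.mod_nonneg _ hN, PySem.Int.mod_lt _ hN⟩
      have htest : PySem.Set.equal (pvA_init N) cur'
          = (!cur'.contains 0 && ((cur'.length : Int) == N - 1)) := by
        rw [pvA_init_eq]
        exact equal_test N hN cur' hnd' hb'
      have hlen : (!cur'.contains 0 && (PySem.Set.len (cur'.filter (fun x => x != 0)) == N - 1))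
          = (!cur'.contains 0 && ((cur'.length : Int) == N - 1)) := by
        by_cases h0 : cur'.contains 0 = true
        · rw [h0]; simp
        · rw [Bool.not_eq_true] at h0
          rw [h0]
          have hfe : cur'.filter (fun x => x != 0) = cur' := by
            apply List.filter_eq_self.2
            intro a ha
            simp only [bne_iff_ne, ne_eq]
            intro hh
            rw [← PySem.Set.contains_iff] at *
            rw [hh] at ha
            rw [h0] at ha
            exact Bool.false_ne_true ha
          rw [hfe]
          rfl
      rw [htest, ← hlen]
      cases hq : (!cur'.contains 0 && (PySem.Set.len (cur'.filter (fun x => x != 0)) == N - 1)) with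
      | true => simp
      | false =>
          simp only [Bool.false_eq_true, if_false]
          exact ih (fun x hx => his x (List.mem_cons_of_mem _ hx)) cur' hnd' hb'

-- ===== VERDICT (by name: the statement is the Claim_ definition above) =====
theorem generator_mod_spec : Claim_equal_generator_mod := by
  intro N _
  unfold Spec_generator_mod generator_mod generator_mod_alt
  by_cases hN : N ≤ 1
  · rw [PySem.List.pyRange_one_eq_nil hN]
    simp [pvA_loop, pvB_loop]
  · have hN' : 0 < N := by omega
    have := loop_spec N hN' (PySem.List.pyRange 1 N 1)
      (fun i hi => (PySem.List.mem_pyRange_one).1 hi) PySem.Set.empty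
      (by simp [PySem.Set.empty]) (by simp [PySem.Set.empty])
    simpa [PySem.Set.empty] using this.symm
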